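-- pv_equiv track=rewrite | github.com/cr941131/linux-do-subscriber | scripts/changelog.py | language_for
-- ===== SOURCE A (Python) =====
-- def language_for(lines: list[str]) -> str:
--     english_markers = (
--         "[Today's date",
--         "Initialize documentation system",
--         "Notes:",
--         "#### Changes",
--         "#### Migration Impact",
--     )
--     if any(any(marker in line for marker in english_markers) for line in lines[:80]):
--         return "en"
--     return "zh"
-- ===== SOURCE B (Python) =====
-- def language_for(lines: list[str]) -> str:
--     english_markers = (
--         "[Today's date",
--         "Initialize documentation system",
--         "Notes:",
--         "#### Changes",
--         "#### Migration Impact",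
--     )
--
--     def scan(rest, budget):
--         if budget == 0 or not rest:
--             return "zh"
--         line = rest[0]
--         for marker in english_markers:
--             if marker in line:
--                 return "en"
--         return scan(rest[1:], budget - 1)
--
--     return scan(lines, 80)
-- ===== Notes on version B (the rewrite author's own statement) =====
-- stated objective: alternative
-- what changed: Replaces the nested any/any over a materialized 80-line slice by a recursive early-returning scan that walks the list with an explicit budget counter, stopping at the first matching line without ever building the slice.
import Mathlib
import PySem

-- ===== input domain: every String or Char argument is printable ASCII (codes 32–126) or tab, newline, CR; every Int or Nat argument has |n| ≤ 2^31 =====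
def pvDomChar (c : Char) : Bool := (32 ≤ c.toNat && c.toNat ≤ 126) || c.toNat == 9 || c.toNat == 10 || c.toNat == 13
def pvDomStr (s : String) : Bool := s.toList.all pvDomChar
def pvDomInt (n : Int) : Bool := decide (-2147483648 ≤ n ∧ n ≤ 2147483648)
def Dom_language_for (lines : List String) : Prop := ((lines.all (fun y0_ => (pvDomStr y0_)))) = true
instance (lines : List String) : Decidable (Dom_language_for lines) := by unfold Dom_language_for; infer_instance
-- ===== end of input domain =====

-- B replaces A's nested any/any over a materialized 80-line slice by a recursive
-- budgeted scan that early-returns "en" on the first matching line (alternative decomposition, same cost).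


-- ===== PORT A =====
-- the tuple english_markers
def pvMarkersA : List String :=
  ["[Today's date", "Initialize documentation system", "Notes:", "#### Changes", "#### Migration Impact"]

def language_for (lines : List String) : String :=
  if (PySem.List.slice lines none (some 80)).any
      (fun line => pvMarkersA.any (fun marker => PySem.Str.isIn marker line)) then
    "en"
  else
    "zh"

-- ===== PORT B =====
-- B's inner for-loop over the markers: first hit wins
def pvLineHits : List String → String → Bool
  | [], _ => false
  | marker :: ms, line => if PySem.Str.isIn marker line then true else pvLineHits ms line

-- B's recursive scan with an explicit budget counter
def pvScan : List String → Nat → String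
  | _, 0 => "zh"
  | [], _ => "zh"
  | line :: rest, Nat.succ budget =>
      if pvLineHits pvMarkersA line then "en" else pvScan rest budget

def language_for_alt (lines : List String) : String := pvScan lines 80

-- ===== PRECONDITION & SPEC =====
def Spec_language_for (lines : List String) (out : String) : Prop := out = language_for_alt lines
instance (lines : List String) (out : String) : Decidable (Spec_language_for lines out) := by unfold Spec_language_for; infer_instance

-- ===== CLAIM (what is proved, stated in full; the proofs are below) =====
def Claim_equal_language_for : Prop := ∀ (lines : List String), Dom_language_for lines → Spec_language_for lines (language_for lines)

-- ===== LEMMAS AND PROOFS =====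

-- the early-return for-loop over markers is the same test as List.any
theorem pvLineHits_eq_any (ms : List String) (line : String) :
    pvLineHits ms line = ms.any (fun marker => PySem.Str.isIn marker line) := by
  induction ms with
  | nil => rfl
  | cons m ms ih =>
    simp only [pvLineHits, List.any_cons, ih]
    by_cases h : PySem.Str.isIn m line <;> simp [h]

-- the budgeted scan computes the if-any-over-take form
theorem pvScan_eq_take (lines : List String) (n : Nat) :
    pvScan lines n =
      if (lines.take n).any (fun line => pvMarkersA.any (fun m => PySem.Str.isIn m line))
      then "en" else "zh" := by
  induction lines generalizing n with
  | nil => cases n <;> simp [pvScan]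
  | cons line rest ih =>
    cases n with
    | zero => simp [pvScan]
    | succ k =>
      simp only [pvScan, List.take_succ_cons, List.any_cons, pvLineHits_eq_any]
      by_cases h : pvMarkersA.any (fun m => PySem.Str.isIn m line) = true <;>
        simp only [h, if_true, if_false, Bool.true_or, Bool.false_or, ih,
          Bool.not_eq_true] <;> simp [h]

-- ===== VERDICT (by name: the statement is the Claim_ definition above) =====
theorem language_for_spec : Claim_equal_language_for := by
  intro lines _
  unfold Spec_language_for language_for language_for_alt
  rw [pvScan_eq_take, show ((80:Int)) = ((80:Nat):Int) from rfl, PySem.List.slice_to_natCast]
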